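-- pv_equiv track=rewrite | github.com/kagemeka/dsalgo | src/python/src/dsalgo/combinatorics.py | combinations_next_comb
-- ===== SOURCE A (Python) =====
-- import typing
--
-- def combinations_next_comb(
--     n: int,
--     k: int,
-- ) -> typing.Generator[tuple[int, ...], None, None]:
--     a = tuple(range(n))
--     n = len(a)
--     if k < 0 or n < k:
--         return
--     if k == 0:
--         yield ()
--         return
--     limit = 1 << n
--     s = (1 << k) - 1
--     while s < limit:
--         yield tuple(a[i] for i in range(n) if s >> i & 1)
--         s = next_combination(s)
--
-- def next_combination(s: int) -> int:
--     lsb = s & -s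
--     i = s + lsb
--     return (s & ~i) // lsb >> 1 | i
-- ===== SOURCE B (Python) =====
-- def combinations_next_comb(n, k):
--     if n < 0:
--         n = 0
--     if k < 0 or k > n:
--         return
--     def colex(m, j):
--         # all j-subsets of range(m), sorted ascending, in colexicographic order
--         if j == 0:
--             yield ()
--             return
--         for top in range(j - 1, m):
--             for rest in colex(top, j - 1):
--                 yield rest + (top,)
--     yield from colex(n, k)
-- ===== Notes on version B (the rewrite author's own statement) =====
-- stated objective: alternative
-- what changed: Replaces Gosper's bit-twiddling mask enumeration (and its per-mask scan of all n bit positions) by a direct recursive generation of the k-subsets in colexicographic order: for each top element, recursively generate the smaller subsets below it; no integers-as-bitmasks at all. Colex order is exactly the increasing-mask order Gosper produces, so the output sequence is identical.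
import Mathlib
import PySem

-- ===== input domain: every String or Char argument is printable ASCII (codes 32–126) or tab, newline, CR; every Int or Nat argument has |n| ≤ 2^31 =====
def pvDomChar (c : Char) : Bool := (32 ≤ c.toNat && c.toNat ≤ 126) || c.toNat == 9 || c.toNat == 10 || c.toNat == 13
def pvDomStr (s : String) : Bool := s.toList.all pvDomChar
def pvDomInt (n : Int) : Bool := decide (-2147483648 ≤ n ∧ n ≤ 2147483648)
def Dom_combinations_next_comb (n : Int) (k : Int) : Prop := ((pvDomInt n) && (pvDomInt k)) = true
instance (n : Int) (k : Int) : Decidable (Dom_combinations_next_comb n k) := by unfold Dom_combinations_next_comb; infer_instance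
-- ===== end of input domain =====

-- B replaces A's Gosper bitmask enumeration (and its per-mask scan of all n bit
-- positions) by a direct recursion generating the k-subsets in colexicographic
-- order — the exact order Gosper's ascending masks yield — with no bit tricks.
-- Both Pythons are generators; the ports return the list of yielded tuples.

-- ===== PORT A =====
def next_combination (s : Int) : Int :=
  let lsb := PySem.Int.band s (-s)
  let i := s + lsb
  PySem.Int.bor ((PySem.Int.floordiv (PySem.Int.band s (Int.not i)) lsb) >>> (1 : Nat)) i

-- the `while s < limit` loop of A; the fuel is a totality guard only (s strictly grows each step)
def combNextLoopA (a : List Int) (n : Int) (limit : Int) : Nat → Int → List (List Int)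
  | 0, _ => []
  | fuel+1, s =>
    if s < limit then
      (((PySem.List.pyRange 0 n 1).filter
          (fun i => PySem.Int.band (s >>> i) 1 != 0)).map  -- s >> i: i ∈ range(n) is ≥ 0, where Int's >>> is Python's
        (fun i => PySem.List.pyGetD a i 0))                -- a[i]: i is always a valid index here
        :: combNextLoopA a n limit fuel (next_combination s)
    else []

def combinations_next_comb (n : Int) (k : Int) : List (List Int) :=
  let a := PySem.List.pyRange 0 n 1
  let n : Int := (a.length : Int)
  if k < 0 || n < k then []
  else if k == 0 then [[]]
  else
    let limit : Int := (1 : Int) <<< n.toNat   -- 1 << n: n = len(a) ≥ 0, toNat exact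
    let s : Int := ((1 : Int) <<< k.toNat) - 1 -- 1 << k: k > 0 in this branch
    combNextLoopA a n limit (limit.toNat + 1) s

-- ===== PORT B =====
-- Source B's `colex(m, j)`: all j-subsets of range(m), sorted ascending, in
-- colexicographic order.  j is only ever called with j ≥ 0, carried as a Nat.
def colexPort (m : Int) (j : Nat) : List (List Int) :=
  match j with
  | 0 => [[]]
  | jj+1 =>
    -- `for top in range(j - 1, m): for rest in colex(top, j - 1): yield rest + (top,)`
    (PySem.List.pyRange (jj : Int) m 1).flatMap
      (fun top => (colexPort top jj).map (fun rest => rest ++ [top]))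

def combinations_next_comb_alt (n : Int) (k : Int) : List (List Int) :=
  let n : Int := if n < 0 then 0 else n
  if k < 0 || n < k then []
  else colexPort n k.toNat

-- ===== PRECONDITION & SPEC =====
def Spec_combinations_next_comb (n : Int) (k : Int) (out : List (List Int)) : Prop := out = combinations_next_comb_alt n k
instance (n : Int) (k : Int) (out : List (List Int)) : Decidable (Spec_combinations_next_comb n k out) := by unfold Spec_combinations_next_comb; infer_instance

-- ===== CLAIM (what is proved, stated in full; the proofs are below) =====
def Claim_equal_combinations_next_comb : Prop := ∀ (n : Int) (k : Int), Dom_combinations_next_comb n k → Spec_combinations_next_comb n k (combinations_next_comb n k)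

-- ===== LEMMAS AND PROOFS =====

-- ---------- Nat-level model of A's Gosper step ----------

-- Python's `next_combination`, on Nat (m & ~p = m - (m &&& p), m & -m = m - (m &&& (m-1)))
def gnext (m : Nat) : Nat :=
  let lsb := m - (m &&& (m-1))
  let i := m + lsb
  ((m - (m &&& i)) / lsb / 2) ||| i

-- m odd: m &&& (m-1) clears exactly the low bit
theorem land_odd_pred (a : Nat) : (2*a+1) &&& (2*a) = 2*a := by
  apply Nat.eq_of_testBit_eq
  intro i
  rw [Nat.testBit_land]
  cases i with
  | zero =>
    have h1 : (2*a+1) % 2 = 1 := by omega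
    have h2 : (2*a) % 2 = 0 := by omega
    simp [Nat.testBit_zero, h1, h2]
  | succ i =>
    have h1 : (2*a+1) / 2 = a := by omega
    have h2 : (2*a) / 2 = a := by omega
    simp [Nat.testBit_add_one, h1, h2]

-- m even: m &&& (m-1) commutes with halving
theorem land_even_pred (a : Nat) (ha : 0 < a) : (2*a) &&& (2*a-1) = 2*(a &&& (a-1)) := by
  apply Nat.eq_of_testBit_eq
  intro i
  rw [Nat.testBit_land]
  cases i with
  | zero =>
    have h2 : (2*a) % 2 = 0 := by omega
    have h3 : (2*(a &&& (a-1))) % 2 = 0 := by omega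
    simp [Nat.testBit_zero, h2, h3]
  | succ i =>
    have h1 : (2*a) / 2 = a := by omega
    have h2 : (2*a-1) / 2 = a - 1 := by omega
    have h3 : (2*(a &&& (a-1))) / 2 = a &&& (a-1) := by omega
    simp [Nat.testBit_add_one, h1, h2, h3]

-- clearing the lowest set bit of 2^a * v with v odd
theorem land_pred_shift (a : Nat) : ∀ v : Nat, v % 2 = 1 →
    (2^a * v) &&& (2^a * v - 1) = 2^a * (v - 1) := by
  induction a with
  | zero =>
    intro v hv
    obtain ⟨t, ht⟩ : ∃ t, v = 2*t+1 := ⟨v/2, by omega⟩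
    subst ht
    simpa using land_odd_pred t
  | succ a ih =>
    intro v hv
    have h : 2^(a+1) * v = 2 * (2^a * v) := by ring
    have hpos : 0 < 2^a * v := by
      have hv1 : 0 < v := by omega
      positivity
    rw [h, land_even_pred _ hpos, ih v hv]
    ring

-- testBit of (2H+1)
theorem testBit_two_mul_add_one (H : Nat) : ∀ j, (2*H+1).testBit j =
    (decide (j = 0) || (decide (1 ≤ j) && H.testBit (j-1))) := by
  intro j
  cases j with
  | zero =>
    have h : (2*H+1) % 2 = 1 := by omega
    simp [Nat.testBit_zero, h]
  | succ j =>
    have h : (2*H+1) / 2 = H := by omega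
    simp [Nat.testBit_add_one, h]

-- the Gosper step on the generic shape H·2^(a+r+1) + (2^r-1)·2^a
theorem gnext_shape (H a r : Nat) (hr : 1 ≤ r) :
    gnext (H*2^(a+r+1) + (2^r-1)*2^a) = H*2^(a+r+1) + 2^(a+r) + (2^(r-1)-1) := by
  have h2r : (2:Nat) ≤ 2^r := by
    calc (2:Nat) = 2^1 := (pow_one 2).symm
    _ ≤ 2^r := Nat.pow_le_pow_right (by norm_num) hr
  set v : Nat := 2^(r+1)*H + (2^r - 1) with hv
  have hSv : H*2^(a+r+1) + (2^r-1)*2^a = 2^a * v := by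
    have e1 : H*2^(a+r+1) = 2^a*(2^(r+1)*H) := by ring
    rw [hv, Nat.mul_add, e1, mul_comm ((2:Nat)^r-1) (2^a)]
  have hvodd : v % 2 = 1 := by
    have e1 : 2^(r+1)*H = 2*(2^r*H) := by ring
    have e3 : (2:Nat)^r = 2*2^(r-1) := by
      rw [← pow_succ']
      congr 1
      omega
    omega
  -- lsb = 2^a
  have hland : (2^a*v) &&& (2^a*v - 1) = 2^a*(v-1) := land_pred_shift a v hvodd
  have hvpos : 0 < v := by omega
  have hlsb : 2^a*v - ((2^a*v) &&& (2^a*v - 1)) = 2^a := by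
    rw [hland]
    have h1 : 2^a*(v-1) = 2^a*v - 2^a := by rw [Nat.mul_sub, Nat.mul_one]
    have h2 : (2:Nat)^a ≤ 2^a*v := Nat.le_mul_of_pos_right _ hvpos
    have h0 : (1:Nat) ≤ 2^a := Nat.one_le_two_pow
    omega
  -- i = 2^(a+r) * (2H+1)
  have hi : 2^a*v + 2^a = 2^(a+r) * (2*H+1) := by
    rw [hv]
    have e : 2^a * (2^(r+1)*H + (2^r-1)) + 2^a = 2^a*2^(r+1)*H + 2^a*(2^r-1) + 2^a := by ring
    rw [e]
    have e2 : 2^a*(2^r-1) + 2^a = 2^a*2^r := by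
      rw [Nat.mul_sub, Nat.mul_one]
      have : 2^a ≤ 2^a * 2^r := Nat.le_mul_of_pos_right _ (by positivity)
      omega
    rw [Nat.add_assoc, e2]
    ring
  -- S &&& i = H * 2^(a+r+1)
  have hSi : (2^a*v) &&& (2^(a+r)*(2*H+1)) = H*2^(a+r+1) := by
    apply Nat.eq_of_testBit_eq
    intro j
    rw [Nat.testBit_land]
    have tS : (2^a*v).testBit j = (decide (j ≥ a) && v.testBit (j-a)) := Nat.testBit_two_pow_mul
    have tv : ∀ t, v.testBit t = if t < r+1 then (2^r-1).testBit t else H.testBit (t-(r+1)) := by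
      intro t
      rw [hv, Nat.testBit_two_pow_mul_add _ (by have : (1:Nat) ≤ 2^r := Nat.one_le_two_pow; omega)]
    have ti : (2^(a+r)*(2*H+1)).testBit j = (decide (j ≥ a+r) && (2*H+1).testBit (j-(a+r))) := Nat.testBit_two_pow_mul
    have tH : (H*2^(a+r+1)).testBit j = (decide (j ≥ a+r+1) && H.testBit (j-(a+r+1))) := by
      rw [mul_comm]; exact Nat.testBit_two_pow_mul
    rw [tS, ti, tH, tv, testBit_two_mul_add_one]
    rcases Nat.lt_or_ge j a with h1 | h1
    · simp [decide_eq_false (by omega : ¬ j ≥ a), decide_eq_false (by omega : ¬ j ≥ a+r),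
        decide_eq_false (by omega : ¬ j ≥ a+r+1)]
      intro hcontra
      exact absurd hcontra (by omega)
    · rcases Nat.lt_or_ge j (a+r) with h2 | h2
      · have : (j - a) < r+1 := by omega
        simp [decide_eq_false (by omega : ¬ j ≥ a+r), decide_eq_false (by omega : ¬ j ≥ a+r+1)]
        intro hcontra
        exact absurd hcontra (by omega)
      · rcases Nat.eq_or_lt_of_le h2 with h3 | h3
        · -- j = a+r : S bit is (2^r-1).testBit r = false
          have e1 : j - a = r := by omega
          have e2 : j - (a+r) = 0 := by omega
          simp [e1, e2, Nat.testBit_two_pow_sub_one,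
            decide_eq_false (by omega : ¬ j ≥ a+r+1)]
          intro hcontra
          exact absurd hcontra (by omega)
        · -- j ≥ a+r+1
          have e1 : ¬ (j - a < r + 1) := by omega
          have e2 : j - a - (r+1) = j - (a+r+1) := by omega
          have e3 : ¬ (j - (a+r) = 0) := by omega
          have e4 : j - (a+r) - 1 = j - (a+r+1) := by omega
          simp [e1, e2, e3, e4, Bool.and_self, decide_eq_true (by omega : j ≥ a), decide_eq_true (by omega : j ≥ a+r),
            decide_eq_true (by omega : j ≥ a+r+1), decide_eq_true (by omega : 1 ≤ j - (a+r))]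
          intro _
          omega
  -- the quotient
  have hq : (2^a*v - H*2^(a+r+1)) / 2^a / 2 = 2^(r-1) - 1 := by
    have e : 2^a*v - H*2^(a+r+1) = (2^r-1)*2^a := by
      rw [← hSv]; omega
    rw [e, Nat.mul_div_cancel _ (by positivity : 0 < 2^a)]
    have e2 : 2^r = 2*2^(r-1) := by
      rw [← pow_succ']
      congr 1
      omega
    omega
  -- the final or
  have hor : (2^(r-1)-1) ||| (2^(a+r)*(2*H+1)) = H*2^(a+r+1) + 2^(a+r) + (2^(r-1)-1) := by
    have hrhs : H*2^(a+r+1) + 2^(a+r) + (2^(r-1)-1) = 2^(a+r)*(2*H+1) + (2^(r-1)-1) := by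
      have e : H*2^(a+r+1) + 2^(a+r) = 2^(a+r)*(2*H+1) := by ring
      omega
    rw [hrhs]
    apply Nat.eq_of_testBit_eq
    intro j
    have hbd : 2^(r-1)-1 < 2^(a+r) := by
      have h1 : 2^(r-1) ≤ 2^(a+r) := Nat.pow_le_pow_right (by norm_num) (by omega)
      have h2 : (1:Nat) ≤ 2^(r-1) := Nat.one_le_two_pow
      omega
    rw [Nat.testBit_or, Nat.testBit_two_pow_mul_add (2*H+1) hbd]
    rcases Nat.lt_or_ge j (a+r) with h1 | h1
    · have : (2^(a+r)*(2*H+1)).testBit j = (decide (j ≥ a+r) && (2*H+1).testBit (j-(a+r))) := Nat.testBit_two_pow_mul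
      simp [this, decide_eq_false (by omega : ¬ j ≥ a+r), h1]
    · have hlow : (2^(r-1)-1).testBit j = false := by
        rw [Nat.testBit_two_pow_sub_one]
        simp
        omega
      have : (2^(a+r)*(2*H+1)).testBit j = (decide (j ≥ a+r) && (2*H+1).testBit (j-(a+r))) := Nat.testBit_two_pow_mul
      simp [hlow, this, decide_eq_true (by omega : j ≥ a+r), if_neg (by omega : ¬ j < a+r)]
  -- assemble
  rw [hSv]
  show ((2^a*v - ((2^a*v) &&& ((2^a*v) + (2^a*v - ((2^a*v) &&& (2^a*v - 1)))))) / (2^a*v - ((2^a*v) &&& (2^a*v - 1))) / 2) ||| ((2^a*v) + (2^a*v - ((2^a*v) &&& (2^a*v - 1)))) = _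
  rw [hlsb, hi, hSi]
  rw [show 2^a*v - H*2^(a+r+1) = (2^a*v - H*2^(a+r+1)) from rfl]
  rw [hq, hor]

-- every positive Nat has the shape
theorem decomp (s : Nat) (hs : 0 < s) :
    ∃ H a r, 1 ≤ r ∧ s = H*2^(a+r+1) + (2^r-1)*2^a := by
  induction s using Nat.strong_induction_on with
  | _ s ih =>
    rcases Nat.even_or_odd s with ⟨t, ht⟩ | ⟨t, ht⟩
    · -- s = 2t, t > 0
      have ht2 : s = 2*t := by omega
      have htp : 0 < t := by omega
      obtain ⟨H, a, r, hr, he⟩ := ih t (by omega) htp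
      exact ⟨H, a+1, r, hr, by rw [ht2, he]; ring⟩
    · -- s = 2t+1
      rcases Nat.even_or_odd t with ⟨u, hteven⟩ | ⟨u, htodd⟩
      · -- t even: H = t/2, a = 0, r = 1
        refine ⟨u, 0, 1, le_refl 1, ?_⟩
        norm_num
        omega
      · -- t odd: recurse
        have htp : 0 < t := by omega
        obtain ⟨H, a, r, hr, he⟩ := ih t (by omega) htp
        match a, he with
        | 0, he =>
          refine ⟨H, 0, r+1, by omega, ?_⟩
          have he' : t = H*2^(r+1) + (2^r - 1) := by
            have e : H*2^(0+r+1) = H*2^(r+1) := by ring_nf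
            simpa [e] using he
          have e1 : H*2^(0+(r+1)+1) = 2*(H*2^(r+1)) := by ring
          have e2 : ((2:Nat)^(r+1+1-1) - 1)*2^0 = 2*2^r - 1 := by
            have : (2:Nat)^(r+1) = 2*2^r := by ring
            simp [this]
          have e3 : (1:Nat) ≤ 2^r := Nat.one_le_two_pow
          rw [e1]
          have e4 : ((2:Nat)^(r+1)-1)*2^0 = 2*2^r - 1 := by
            have : (2:Nat)^(r+1) = 2*2^r := by ring
            simp [this]
          rw [e4]
          omega
        | a+1, he =>
          exfalso
          have : t = 2 * (H*2^(a+r+1) + (2^r-1)*2^a) := by rw [he]; ring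
          omega

theorem gnext_gt {s : Nat} (hs : 0 < s) : s < gnext s := by
  obtain ⟨H, a, r, hr, hsh⟩ := decomp s hs
  rw [hsh, gnext_shape H a r hr]
  have h1 : 2^(a+r) = 2^a * 2^r := pow_add 2 a r
  have h2 : (1:Nat) ≤ 2^a := Nat.one_le_two_pow
  have h3 : (1:Nat) ≤ 2^(r-1) := Nat.one_le_two_pow
  have h4 : (2^r - 1) * 2^a = 2^a * 2^r - 2^a := by rw [Nat.sub_mul, one_mul, mul_comm]
  have h5 : 2^a ≤ 2^a * 2^r := Nat.le_mul_of_pos_right _ (by positivity)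
  rw [h1, h4]
  omega

-- the Gosper chain: all iterates of gnext strictly below the limit
def chainW (L : Nat) (s : Nat) : List Nat :=
  if h : 0 < s ∧ s < L then s :: chainW L (gnext s) else []
  termination_by L - s
  decreasing_by have := gnext_gt h.1; omega

-- ---------- Nat-level model of B's colex recursion ----------

def colexN (m : Nat) (j : Nat) : List (List Nat) :=
  match j with
  | 0 => [[]]
  | jj+1 => (List.range' jj (m - jj)).flatMap (fun t => (colexN t jj).map (· ++ [t]))

def maskOf (c : List Nat) : Nat := (c.map (2 ^ ·)).sum

theorem maskOf_append (c : List Nat) (t : Nat) : maskOf (c ++ [t]) = maskOf c + 2^t := by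
  simp [maskOf]

theorem colexN_eq_nil {m j : Nat} (h : m < j) : colexN m j = [] := by
  match j with
  | jj+1 =>
    have : m - jj = 0 := by omega
    simp [colexN, this]

theorem colexN_split {m k : Nat} (hk : 1 ≤ k) (hkm : k ≤ m+1) :
    colexN (m+1) k = colexN m k ++ (colexN m (k-1)).map (· ++ [m]) := by
  obtain ⟨j, rfl⟩ : ∃ j, k = j+1 := ⟨k-1, by omega⟩
  have h1 : m+1-j = (m-j)+1 := by omega
  have h2 : j + (m - j) = m := by omega
  by_cases hjm : j ≤ m
  · rw [colexN, h1, List.range'_concat]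
    simp only [one_mul, h2, List.flatMap_append, List.flatMap_cons, List.flatMap_nil,
      List.append_nil]
    rfl
  · omega

theorem colexN_last : ∀ j m, j ≤ m → (colexN m j).getLast? = some (List.range' (m-j) j) := by
  intro j
  induction j with
  | zero => intro m _; simp [colexN]
  | succ j ih =>
    intro m hm
    obtain ⟨mm, rfl⟩ : ∃ mm, m = mm+1 := ⟨m-1, by omega⟩
    rw [colexN_split (by omega) (by omega)]
    simp only [Nat.add_sub_cancel]
    rw [List.getLast?_append, List.getLast?_map, ih mm (by omega)]
    have h2 : mm - j + j = mm := by omega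
    have : List.range' (mm-j) j ++ [mm] = List.range' (mm+1-(j+1)) (j+1) := by
      rw [show mm+1-(j+1) = mm - j by omega, List.range'_concat, one_mul, h2]
    simp [this]

theorem colexN_self : ∀ k, colexN k k = [List.range k] := by
  intro k
  induction k with
  | zero => simp [colexN, List.range_zero]
  | succ k ih =>
    rw [colexN_split (by omega) (by omega)]
    simp only [Nat.add_sub_cancel]
    rw [colexN_eq_nil (by omega), ih]
    simp [List.range_succ]

theorem maskOf_range' : ∀ t s, maskOf (List.range' s t) = (2^t-1)*2^s := by
  intro t
  induction t with
  | zero => intro s; simp [maskOf]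
  | succ t ih =>
    intro s
    rw [List.range'_concat, one_mul, maskOf_append, ih]
    have e2 : 2^(s+t) = 2^t * 2^s := by rw [pow_add]; ring
    have e : 2^(t+1) * 2^s = 2^t*2^s + 2^t*2^s := by ring
    have hge : 2^s ≤ 2^t * 2^s := Nat.le_mul_of_pos_left _ (by positivity)
    rw [Nat.sub_mul, Nat.sub_mul, one_mul, e2]
    omega

theorem maskOf_range (k : Nat) : maskOf (List.range k) = 2^k - 1 := by
  have := maskOf_range' k 0
  simpa [List.range_eq_range'] using this

-- ---------- the chain equals the colex enumeration ----------

-- the only shapes fitting below 2^m have their bits below m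
theorem pow_shape_bound {s m a r : Nat} (hr : 1 ≤ r) (H : Nat)
    (he : s = H*2^(a+r+1) + (2^r-1)*2^a) (hs : s < 2^m) : a + r ≤ m := by
  have h1 : 2^(a+(r-1)) ≤ (2^r-1)*2^a := by
    have e : 2^(a+(r-1)) = 2^(r-1)*2^a := by rw [pow_add]; ring
    rw [e]
    apply Nat.mul_le_mul_right
    have : (2:Nat)^(r-1) < 2^r := Nat.pow_lt_pow_right (by norm_num) (by omega)
    omega
  have h2 : 2^(a+(r-1)) < 2^m := by omega
  have h3 : a+(r-1) < m := by
    by_contra hcon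
    have := Nat.pow_le_pow_right (show 0 < 2 by norm_num) (show m ≤ a+(r-1) by omega)
    omega
  omega

-- lifting a chain into the upper half
theorem chainW_upper (m : Nat) : ∀ s, 0 < s → s < 2^m →
    chainW (2^(m+1)) (2^m + s) = (chainW (2^m) s).map (2^m + ·) := by
  suffices h : ∀ d s, 2^m - s = d → 0 < s → s < 2^m →
      chainW (2^(m+1)) (2^m + s) = (chainW (2^m) s).map (2^m + ·) by
    exact fun s hs hsm => h (2^m - s) s rfl hs hsm
  intro d
  induction d using Nat.strong_induction_on with
  | _ d ih =>
    intro s hd hs hsm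
    obtain ⟨H, a, r, hr, he⟩ := decomp s hs
    have har : a + r ≤ m := pow_shape_bound hr H he hsm
    have hlt2 : 2^m + s < 2^(m+1) := by
      have : (2:Nat)^(m+1) = 2^m + 2^m := by ring
      omega
    rcases Nat.eq_or_lt_of_le har with harEq | harLt
    · -- a + r = m : both chains end here
      have hH : H = 0 := by
        by_contra hH
        have h1 : 2^(a+r+1) ≤ H*2^(a+r+1) := Nat.le_mul_of_pos_left _ (by omega)
        have h2 : (2:Nat)^m < 2^(a+r+1) := by
          apply Nat.pow_lt_pow_right (by norm_num)
          omega
        omega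
      have hsEq : s = (2^r-1)*2^a := by rw [he, hH]; ring
      have hupEq : 2^m + s = (2^(r+1)-1)*2^a := by
        have e1 : (2:Nat)^m = 2^r * 2^a := by rw [← harEq, pow_add]; ring
        have e2 : ((2:Nat)^(r+1)-1)*2^a = 2^r*2^a + (2^r-1)*2^a := by
          rw [Nat.sub_mul, Nat.sub_mul, one_mul]
          have e3 : (2:Nat)^(r+1)*2^a = 2^r*2^a + 2^r*2^a := by ring
          have e4 : 2^a ≤ 2^r*2^a := Nat.le_mul_of_pos_left _ (by positivity)
          omega
        omega
      have hgup : gnext (2^m + s) = 2^(a+r+1) + (2^r - 1) := by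
        rw [hupEq]
        have := gnext_shape 0 a (r+1) (by omega)
        simpa using this
      have hgs : gnext s = 2^(a+r) + (2^(r-1)-1) := by
        rw [hsEq]
        have := gnext_shape 0 a r hr
        simpa using this
      rw [chainW, dif_pos ⟨by omega, hlt2⟩]
      rw [chainW, dif_neg (by
        rw [hgup]
        have : (2:Nat)^(m+1) = 2^(a+r+1) := by rw [harEq]
        omega)]
      rw [chainW, dif_pos ⟨hs, hsm⟩]
      rw [chainW, dif_neg (by
        rw [hgs]
        have : (2:Nat)^m = 2^(a+r) := by rw [harEq]
        omega)]
      simp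
    · -- a + r < m : step in lockstep
      have hc : a+r+1 ≤ m := by omega
      have hHb : H * 2^(a+r+1) < 2^m := by
        have h1 : H*2^(a+r+1) ≤ s := by
          rw [he]; omega
        omega
      have hHlt : H < 2^(m-(a+r+1)) := by
        have e : (2:Nat)^m = 2^(m-(a+r+1)) * 2^(a+r+1) := by
          rw [← pow_add]
          congr 1
          omega
        rw [e] at hHb
        exact Nat.lt_of_mul_lt_mul_right hHb
      have hgs : gnext s = H*2^(a+r+1) + 2^(a+r) + (2^(r-1)-1) := by
        rw [he]; exact gnext_shape H a r hr
      have hgsLt : gnext s < 2^m := by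
        have h1 : (H+1) * 2^(a+r+1) ≤ 2^(m-(a+r+1)) * 2^(a+r+1) := Nat.mul_le_mul_right _ (by omega)
        have e : (2:Nat)^m = 2^(m-(a+r+1)) * 2^(a+r+1) := by
          rw [← pow_add]; congr 1; omega
        have h2 : 2^(r-1) ≤ 2^(a+r) := Nat.pow_le_pow_right (by norm_num) (by omega)
        have h3 : (2:Nat)^(a+r+1) = 2^(a+r) + 2^(a+r) := by ring
        have h4 : (H+1) * 2^(a+r+1) = H*2^(a+r+1) + 2^(a+r+1) := by ring
        rw [hgs]
        omega
      have hgup : gnext (2^m + s) = 2^m + gnext s := by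
        have e : 2^m + s = (H + 2^(m-(a+r+1)))*2^(a+r+1) + (2^r-1)*2^a := by
          have e2 : (H + 2^(m-(a+r+1)))*2^(a+r+1) = H*2^(a+r+1) + 2^(m-(a+r+1))*2^(a+r+1) := by ring
          have e3 : (2:Nat)^(m-(a+r+1)) * 2^(a+r+1) = 2^m := by
            rw [← pow_add]; congr 1; omega
          rw [e2, e3, he]
          omega
        rw [e, gnext_shape _ a r hr]
        have e2 : (H + 2^(m-(a+r+1)))*2^(a+r+1) = H*2^(a+r+1) + 2^(m-(a+r+1))*2^(a+r+1) := by ring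
        have e3 : (2:Nat)^(m-(a+r+1)) * 2^(a+r+1) = 2^m := by
          rw [← pow_add]; congr 1; omega
        rw [hgs, e2, e3]
        omega
      have hggt := gnext_gt hs
      conv_lhs => rw [chainW]
      rw [dif_pos ⟨by omega, hlt2⟩]
      conv_rhs => rw [chainW, dif_pos ⟨hs, hsm⟩]
      simp only [List.map_cons]
      congr 1
      rw [hgup]
      exact ih (2^m - gnext s) (by omega) (gnext s) rfl (by omega) hgsLt

-- appending the continuation past a smaller limit
theorem chainW_append (L L' : Nat) (hLL : L ≤ L') : ∀ s e, 0 < s →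
    (chainW L s).getLast? = some e →
    chainW L' s = chainW L s ++ chainW L' (gnext e) := by
  suffices h : ∀ d s e, L - s = d → 0 < s → (chainW L s).getLast? = some e →
      chainW L' s = chainW L s ++ chainW L' (gnext e) by
    exact fun s e hs hl => h (L-s) s e rfl hs hl
  intro d
  induction d using Nat.strong_induction_on with
  | _ d ih =>
    intro s e hd hs hlast
    by_cases hsL : s < L
    · rw [chainW, dif_pos ⟨hs, hsL⟩] at hlast
      rcases h2 : chainW L (gnext s) with _ | ⟨x, xs⟩
      · rw [h2] at hlast
        simp at hlast
        subst hlast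
        conv_lhs => rw [chainW]
        rw [dif_pos ⟨hs, lt_of_lt_of_le hsL hLL⟩]
        conv_rhs => rw [chainW, dif_pos ⟨hs, hsL⟩]
        rw [h2]
        simp
      · rw [h2] at hlast
        have hlast' : (chainW L (gnext s)).getLast? = some e := by
          rw [h2]
          simpa using hlast
        have hgt := gnext_gt hs
        have hrec := ih (L - gnext s) (by omega) (gnext s) e rfl (by omega) hlast'
        conv_lhs => rw [chainW]
        rw [dif_pos ⟨hs, lt_of_lt_of_le hsL hLL⟩, hrec]
        conv_rhs => rw [chainW, dif_pos ⟨hs, hsL⟩]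
        simp
    · rw [chainW, dif_neg (by tauto)] at hlast
      simp at hlast

theorem chain_eq_colex : ∀ n k, 1 ≤ k → k ≤ n →
    chainW (2^n) (2^k - 1) = (colexN n k).map maskOf := by
  intro n
  induction n with
  | zero => intro k h1 h2; omega
  | succ n ih =>
    intro k hk hkn
    have hkpos : (1:Nat) ≤ 2^k - 1 := by
      have : (2:Nat) ≤ 2^k := by
        calc (2:Nat) = 2^1 := (pow_one 2).symm
        _ ≤ 2^k := Nat.pow_le_pow_right (by norm_num) hk
      omega
    rcases Nat.eq_or_lt_of_le hkn with hEq | hLt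
    · -- k = n+1 : single combination
      subst hEq
      rw [chainW, dif_pos ⟨by omega, by
        have : (1:Nat) ≤ 2^(n+1) := Nat.one_le_two_pow
        omega⟩]
      have hg : gnext (2^(n+1) - 1) = 2^(n+1) + (2^(n+1-1) - 1) := by
        have := gnext_shape 0 0 (n+1) (by omega)
        simpa using this
      rw [chainW, dif_neg (by rw [hg]; omega)]
      rw [colexN_self, List.map_singleton, maskOf_range]
    · -- k ≤ n
      have hkn' : k ≤ n := by omega
      have h1 := ih k hk hkn'
      have hlast : (chainW (2^n) (2^k - 1)).getLast? = some ((2^k-1)*2^(n-k)) := by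
        rw [h1, List.getLast?_map, colexN_last k n hkn', Option.map_some, maskOf_range']
      have happ := chainW_append (2^n) (2^(n+1)) (Nat.pow_le_pow_right (by norm_num) (by omega))
        (2^k - 1) ((2^k-1)*2^(n-k)) (by omega) hlast
      have hg : gnext ((2^k-1)*2^(n-k)) = 2^n + (2^(k-1) - 1) := by
        have h := gnext_shape 0 (n-k) k hk
        have e : (2:Nat)^(n-k+k) = 2^n := by congr 1; omega
        simpa [e] using h
      rw [happ, hg, h1]
      have hsplit := colexN_split hk (by omega)
      rw [hsplit, List.map_append]
      congr 1
      -- upper half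
      rcases Nat.eq_or_lt_of_le hk with hk1 | hk2
    -- k = 1
      · rw [← hk1]
        norm_num
        rw [chainW, dif_pos ⟨by positivity, by
          have : (2:Nat)^(n+1) = 2^n + 2^n := by ring
          have h1n : (1:Nat) ≤ 2^n := Nat.one_le_two_pow
          omega⟩]
        have hg2 : gnext (2^n) = 2^(n+1) + (2^0 - 1) := by
          have h := gnext_shape 0 n 1 (le_refl 1)
          have e : (2^1-1)*2^n = 2^n := by norm_num
          rw [e] at h
          simpa using h
        rw [chainW, dif_neg (by rw [hg2]; omega)]
        simp [colexN]
        rfl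
      · -- k ≥ 2
        have ht0 : (0:Nat) < 2^(k-1) - 1 := by
          have : (2:Nat) ≤ 2^(k-1) := by
            calc (2:Nat) = 2^1 := (pow_one 2).symm
            _ ≤ 2^(k-1) := Nat.pow_le_pow_right (by norm_num) (by omega)
          omega
        have ht1 : 2^(k-1) - 1 < 2^n := by
          have : (2:Nat)^(k-1) ≤ 2^n := Nat.pow_le_pow_right (by norm_num) (by omega)
          omega
        rw [chainW_upper n _ ht0 ht1, ih (k-1) (by omega) (by omega)]
        rw [List.map_map, List.map_map]
        apply List.map_congr_left
        intro c _
        simp [maskOf_append]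
        omega

-- ---------- bitIndices of a colex mask ----------

theorem bitIndices_add_pow {x t : Nat} (hx : x < 2^t) :
    (x + 2^t).bitIndices = x.bitIndices ++ [t] := by
  induction t generalizing x with
  | zero =>
    interval_cases x
    simp
  | succ t ih =>
    rcases Nat.even_or_odd x with ⟨u, hu⟩ | ⟨u, hu⟩
    · have h : x + 2^(t+1) = 2*(u + 2^t) := by rw [hu]; ring
      rw [h, Nat.bitIndices_two_mul, ih (by omega), hu,
        show u+u = 2*u by ring, Nat.bitIndices_two_mul]
      simp
    · have h : x + 2^(t+1) = 2*(u + 2^t)+1 := by rw [hu]; ring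
      rw [h, Nat.bitIndices_two_mul_add_one, ih (by omega), hu, Nat.bitIndices_two_mul_add_one]
      simp

theorem maskOf_lt : ∀ j m c, c ∈ colexN m j → maskOf c < 2^m := by
  intro j
  induction j with
  | zero =>
    intro m c hc
    simp only [colexN, List.mem_singleton] at hc
    subst hc
    simpa [maskOf] using Nat.pos_pow_of_pos m (by norm_num)
  | succ j ih =>
    intro m c hc
    simp only [colexN, List.mem_flatMap, List.mem_map] at hc
    obtain ⟨t, ht, rest, hrest, rfl⟩ := hc
    have htm : t < m := by
      have := List.mem_range'.mp ht
      omega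
    have h1 := ih t rest hrest
    rw [maskOf_append]
    calc maskOf rest + 2^t < 2^t + 2^t := by omega
      _ = 2^(t+1) := by ring
      _ ≤ 2^m := Nat.pow_le_pow_right (by norm_num) (by omega)

theorem bitIndices_maskOf : ∀ j m c, c ∈ colexN m j → (maskOf c).bitIndices = c := by
  intro j
  induction j with
  | zero =>
    intro m c hc
    simp only [colexN, List.mem_singleton] at hc
    subst hc
    simp [maskOf]
  | succ j ih =>
    intro m c hc
    simp only [colexN, List.mem_flatMap, List.mem_map] at hc
    obtain ⟨t, _, rest, hrest, rfl⟩ := hc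
    rw [maskOf_append, bitIndices_add_pow (maskOf_lt j t rest hrest), ih t rest hrest]

-- ---------- glue: port A on Int equals the Nat chain ----------

-- Python's t & -t on a nonnegative t, in Nat terms
theorem band_neg_self (m : Nat) : PySem.Int.band (m : Int) (-(m : Int)) = ((m - (m &&& (m-1)) : Nat) : Int) := by
  unfold PySem.Int.band
  rcases Nat.eq_zero_or_pos m with h|h
  · subst h; norm_num
  · rw [if_pos (by positivity), if_neg (by omega)]
    have e2 : (-(-(m:Int)) - 1).toNat = m - 1 := by omega
    rw [e2, Int.toNat_natCast]

theorem int_not_eq (p : Int) : Int.not p = -p - 1 := by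
  cases p with
  | ofNat n => simp [Int.not, Int.negSucc_eq]; ring
  | negSucc n => simp [Int.not, Int.negSucc_eq]

-- Python's m & ~p on nonnegative m, p, in Nat terms
theorem band_not (m p : Nat) : PySem.Int.band (m : Int) (Int.not (p : Int)) = ((m - (m &&& p) : Nat) : Int) := by
  unfold PySem.Int.band
  rw [int_not_eq]
  rw [if_pos (by positivity), if_neg (by omega)]
  have e : (-(-(p:Int) - 1) - 1).toNat = p := by omega
  rw [e, Int.toNat_natCast]

theorem next_combination_natCast (m : Nat) (hm : 0 < m) :
    next_combination (m : Int) = (gnext m : Int) := by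
  unfold next_combination gnext
  simp only
  rw [band_neg_self]
  have e1 : (m:Int) + ((m - (m &&& (m-1)) : Nat) : Int) = ((m + (m - (m &&& (m-1))) : Nat) : Int) := by
    push_cast
    ring
  rw [e1, band_not, PySem.Int.floordiv_natCast, ← Int.natCast_shiftRight, PySem.Int.bor_natCast]
  congr 1

-- ---------- glue: A's loop body extracts the bit indices of the mask ----------

theorem filter_range_testBit : ∀ (n m : Nat), m < 2^n →
    (List.range n).filter (fun i => m.testBit i) = Nat.bitIndices m := by
  intro n
  induction n with
  | zero => intro m hm; interval_cases m; simp
  | succ n ih =>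
    intro m hm
    rw [List.range_succ_eq_map, List.filter_cons, List.filter_map]
    have hcomp : ∀ j ∈ List.range n, ((fun i => m.testBit i) ∘ Nat.succ) j = (m/2).testBit j := by
      intro j _; simp [Nat.testBit_add_one]
    rw [List.filter_congr hcomp, ih (m/2) (by omega)]
    rcases Nat.even_or_odd m with ⟨a, hae⟩ | ⟨a, hao⟩
    · have h0 : m.testBit 0 = false := by simp [Nat.testBit_zero]; omega
      have hd : m/2 = a := by omega
      have hbi : Nat.bitIndices m = (Nat.bitIndices a).map (· + 1) := by
        have : m = 2*a := by omega
        rw [this, Nat.bitIndices_two_mul]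
      rw [h0, hd, hbi]
      simp
    · have h0 : m.testBit 0 = true := by simp [Nat.testBit_zero]; omega
      have hd : m/2 = a := by omega
      have hbi : Nat.bitIndices m = 0 :: (Nat.bitIndices a).map (· + 1) := by
        have : m = 2*a+1 := by omega
        rw [this, Nat.bitIndices_two_mul_add_one]
      rw [h0, hd, hbi]
      simp

-- the body of A's loop equals the bit indices of the mask
theorem headA_eq (N : Nat) (m : Nat) (h : m < 2^N) :
    ((PySem.List.pyRange 0 (N : Int) 1).filter
        (fun i => PySem.Int.band ((m : Int) >>> i) 1 != 0)).map
      (fun i => PySem.List.pyGetD (PySem.List.pyRange 0 (N : Int) 1) i 0)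
    = (Nat.bitIndices m).map (fun j : Nat => (j : Int)) := by
  rw [PySem.List.pyRange_zero_nat, List.filter_map, List.map_map]
  have hq : ∀ j ∈ List.range N,
      ((fun i : Int => PySem.Int.band ((m : Int) >>> i) 1 != 0) ∘ (fun k : Nat => (k : Int))) j
      = m.testBit j := by
    intro j _
    simp only [Function.comp_apply]
    rw [Int.shiftRight_natCast, PySem.Int.band_one, PySem.Int.mod_eq_emod_of_pos (by norm_num)]
    rw [Bool.eq_iff_iff]
    simp only [bne_iff_ne, ne_eq, Nat.testBit, Nat.one_and_eq_mod_two]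
    omega
  rw [List.filter_congr hq, filter_range_testBit N m h]
  have hmap : ∀ j ∈ Nat.bitIndices m,
      ((fun i : Int => PySem.List.pyGetD (List.map (fun k : Nat => (k : Int)) (List.range N)) i 0) ∘ (fun k : Nat => (k : Int))) j
      = (j : Int) := by
    intro j hj
    have hjN : j < N := by
      have h2 := Nat.two_pow_le_of_mem_bitIndices hj
      rcases Nat.lt_or_ge j N with h'|h'
      · exact h'
      · have h3 := Nat.pow_le_pow_right (hx := by omega) (n := 2) h'
        omega
    simp only [Function.comp_apply]
    rw [PySem.List.pyGetD_eq_getElem _ _ (by positivity)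
        (by simpa using (by exact_mod_cast hjN : (j:Int) < (N:Int)))]
    simp
  rw [List.map_congr_left hmap]

-- A's fueled Int loop computes the Nat chain, mapped through bitIndices
theorem loopA_eq (N : Nat) : ∀ (f : Nat) (s : Nat), 0 < s → 2^N ≤ f + s →
    combNextLoopA (PySem.List.pyRange 0 (N : Int) 1) (N : Int) ((1 : Int) <<< N) f (s : Int)
    = (chainW (2^N) s).map (fun m => (Nat.bitIndices m).map (fun j : Nat => (j : Int))) := by
  have hlim : ((1:Int) <<< N) = ((2^N : Nat) : Int) := by
    rw [Int.shiftLeft_eq]; push_cast; ring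
  intro f
  induction f with
  | zero =>
    intro s hs hf
    rw [chainW, dif_neg (by omega)]
    rfl
  | succ f ih =>
    intro s hs hf
    by_cases hsN : s < 2^N
    · have hlt : (s:Int) < (1:Int) <<< N := by rw [hlim]; exact_mod_cast hsN
      rw [chainW, dif_pos ⟨hs, hsN⟩]
      simp only [combNextLoopA, if_pos hlt, List.map_cons]
      congr 1
      · exact headA_eq N s hsN
      · rw [next_combination_natCast s hs]
        exact ih (gnext s) (by have := gnext_gt hs; omega) (by have := gnext_gt hs; omega)
    · have hlt : ¬ ((s:Int) < (1:Int) <<< N) := by rw [hlim]; exact_mod_cast hsN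
      rw [chainW, dif_neg (by omega)]
      simp only [combNextLoopA, if_neg hlt, List.map_nil]

-- B's Int port computes the Nat colex enumeration
theorem colexPort_eq : ∀ (j : Nat) (M : Nat),
    colexPort (M : Int) j = (colexN M j).map (fun c => c.map (fun x : Nat => (x : Int))) := by
  intro j
  induction j with
  | zero => intro M; simp [colexPort, colexN]
  | succ j ih =>
    intro M
    have hR : PySem.List.pyRange (j : Int) (M : Int) 1 = (List.range' j (M - j)).map (fun t : Nat => (t : Int)) := by
      rw [PySem.List.pyRange_one, List.range'_eq_map_range]
      have e : ((M:Int) - (j:Int)).toNat = M - j := by omega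
      rw [e, List.map_map]
      apply List.map_congr_left
      intro x _
      simp
    rw [colexPort, hR, List.flatMap_map, colexN, List.map_flatMap]
    congr 1
    funext t
    rw [ih t, List.map_map, List.map_map]
    apply List.map_congr_left
    intro c _
    simp

-- ===== VERDICT (by name: the statement is the Claim_ definition above) =====
theorem bitIndices_cast_map (N K : Nat) (hK : 1 ≤ K) (hKN : K ≤ N) :
    ((colexN N K).map maskOf).map (fun m => (Nat.bitIndices m).map (fun j : Nat => (j : Int)))
      = (colexN N K).map (fun c => c.map (fun x : Nat => (x : Int))) := by
  rw [List.map_map]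
  apply List.map_congr_left
  intro c hc
  simp only [Function.comp_apply]
  rw [bitIndices_maskOf K N c hc]

theorem combinations_next_comb_spec : Claim_equal_combinations_next_comb := by
  intro n k _
  unfold Spec_combinations_next_comb combinations_next_comb combinations_next_comb_alt
  dsimp only
  have hlen : ((PySem.List.pyRange 0 n 1).length : Int) = if n < 0 then 0 else n := by
    rw [PySem.List.length_pyRange_one]; split <;> omega
  rw [hlen]
  set n2 : Int := if n < 0 then 0 else n with hn2
  have hn2nn : 0 ≤ n2 := by rw [hn2]; split <;> omega
  set N : Nat := n2.toNat with hN
  have hn2eq : n2 = (N : Int) := by rw [hN]; omega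
  have hrange : PySem.List.pyRange 0 n 1 = PySem.List.pyRange 0 (N:Int) 1 := by
    rw [PySem.List.pyRange_one, PySem.List.pyRange_one]
    have e : (n - 0).toNat = ((N:Int) - 0).toNat := by
      rw [← hn2eq, hn2]
      split <;> omega
    rw [e]
  by_cases hc : (k < 0 || n2 < k) = true
  · rw [if_pos hc, if_pos hc]
  · rw [if_neg hc, if_neg hc]
    simp only [Bool.or_eq_true, decide_eq_true_eq, not_or, not_lt] at hc
    set K : Nat := k.toNat with hK
    have hkK : k = (K:Int) := by omega
    by_cases hk : (k == 0) = true
    · rw [if_pos hk]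
      have hK0 : K = 0 := by
        simp only [beq_iff_eq] at hk
        omega
      rw [hK0]
      rfl
    · rw [if_neg hk]
      have hK1 : 1 ≤ K := by
        simp only [beq_iff_eq] at hk
        omega
      have hKN : K ≤ N := by omega
      have h2K : (1:Nat) ≤ 2^K := Nat.one_le_two_pow
      have hsInt : ((1 : Int) <<< K) - 1 = ((2^K - 1 : Nat) : Int) := by
        rw [Int.shiftLeft_eq, Int.natCast_sub h2K]
        push_cast
        ring
      have hfuel : ((1:Int) <<< N).toNat = 2^N := by
        rw [Int.shiftLeft_eq]
        have : ((1:Int) * 2^N) = ((2^N : Nat) : Int) := by push_cast; ring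
        rw [this, Int.toNat_natCast]
      have h2K2 : (2:Nat) ≤ 2^K := by
        calc (2:Nat) = 2^1 := (pow_one 2).symm
        _ ≤ 2^K := Nat.pow_le_pow_right (by norm_num) hK1
      rw [hrange, hn2eq, hsInt, hfuel,
        loopA_eq N (2^N + 1) (2^K - 1) (by omega) (by omega),
        chain_eq_colex N K hK1 hKN,
        bitIndices_cast_map N K hK1 hKN]
      exact (colexPort_eq K N).symm
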